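-- pv_equiv track=rewrite | github.com/opendev-to/opendev-py | opendev/core/docker/tool_handler.py | _check_command_has_error
-- ===== SOURCE A (Python) =====
-- def _check_command_has_error(exit_code: int, output: str) -> bool:
--     """Check if command output indicates an error.
--
--     Args:
--         exit_code: Command exit code
--         output: Command output string
--
--     Returns:
--         True if the command appears to have failed
--     """
--     if exit_code != 0:
--         return True
--
--     # Check for common error patterns in output
--     error_patterns = [
--         "Error:",
--         "error:",
--         "ERROR:",
--         "ModuleNotFoundError",
--         "ImportError",
--         "No such file or directory",
--         "SyntaxError",
--         "TypeError",
--         "ValueError",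
--         "Traceback (most recent call last)",
--         "FileNotFoundError",
--         "NameError",
--         "AttributeError",
--     ]
--     for pattern in error_patterns:
--         if pattern in output:
--             return True
--
--     return False
-- ===== SOURCE B (Python) =====
-- _ERROR_PATTERNS = [
--     "Error:",
--     "error:",
--     "ERROR:",
--     "ModuleNotFoundError",
--     "ImportError",
--     "No such file or directory",
--     "SyntaxError",
--     "TypeError",
--     "ValueError",
--     "Traceback (most recent call last)",
--     "FileNotFoundError",
--     "NameError",
--     "AttributeError",
-- ]
--
-- # index the patterns once by their first character
-- _BY_FIRST = {}
-- for _p in _ERROR_PATTERNS: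
--     _BY_FIRST[_p[0]] = _BY_FIRST.get(_p[0], []) + [_p]
--
--
-- def _check_command_has_error(exit_code: int, output: str) -> bool:
--     if exit_code != 0:
--         return True
--     # single left-to-right pass: at each position try only the patterns
--     # that start with the character found there
--     for i, ch in enumerate(output):
--         for p in _BY_FIRST.get(ch, ()):
--             if output.startswith(p, i):
--                 return True
--     return False
-- ===== Notes on version B (the rewrite author's own statement) =====
-- stated objective: alternative
-- what changed: Instead of thirteen independent 'pattern in output' substring scans, B builds a first-character index of the patterns once and makes a single left-to-right pass over the output, trying at each position only the patterns that begin with the character found there.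
import Mathlib
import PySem

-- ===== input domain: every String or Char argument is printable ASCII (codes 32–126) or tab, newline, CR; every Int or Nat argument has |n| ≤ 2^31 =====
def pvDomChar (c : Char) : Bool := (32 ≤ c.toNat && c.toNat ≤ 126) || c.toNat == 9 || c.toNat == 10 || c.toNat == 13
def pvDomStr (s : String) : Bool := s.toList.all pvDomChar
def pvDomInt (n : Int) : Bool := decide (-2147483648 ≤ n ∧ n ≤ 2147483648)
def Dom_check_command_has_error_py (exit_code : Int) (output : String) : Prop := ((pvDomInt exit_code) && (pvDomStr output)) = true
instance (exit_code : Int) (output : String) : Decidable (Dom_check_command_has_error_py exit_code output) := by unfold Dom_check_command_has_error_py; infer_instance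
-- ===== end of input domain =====

-- B replaces A's thirteen independent 'pattern in output' substring scans by one
-- left-to-right pass over the output that consults a first-character index of the
-- same patterns (objective: alternative algorithm, same asymptotic cost).

-- the shared pattern-list constant (module-level data in both Pythons)
def pvErrorPatterns : List String :=
  ["Error:", "error:", "ERROR:", "ModuleNotFoundError", "ImportError",
   "No such file or directory", "SyntaxError", "TypeError", "ValueError",
   "Traceback (most recent call last)", "FileNotFoundError", "NameError",
   "AttributeError"]

-- ===== PORT A =====
def check_command_has_error_py (exit_code : Int) (output : String) : Bool :=
  if exit_code ≠ 0 then true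
  else pvErrorPatterns.any (fun p => PySem.Str.isIn p output)

-- ===== PORT B =====
-- p[0] of a pattern (all patterns are nonempty; headD is the totality guard)
def pvHead (p : String) : Char := p.toList.headD ' '

-- _BY_FIRST: the first-character index, built once by the module-level loop
def pvByFirst : PySem.Dict Char (List String) :=
  pvErrorPatterns.foldl (fun d p => d.modify (pvHead p) [] (· ++ [p])) PySem.Dict.empty

-- the single pass: at each position try the patterns indexed under that character
def pvScan : List Char → Bool
  | [] => false
  | c :: rest =>
      ((pvByFirst.getD c []).any (fun p => PySem.Chars.startswith (c :: rest) p.toList))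
      || pvScan rest

def check_command_has_error_py_alt (exit_code : Int) (output : String) : Bool :=
  if exit_code ≠ 0 then true
  else pvScan output.toList

-- ===== PRECONDITION & SPEC =====
def Spec_check_command_has_error_py (exit_code : Int) (output : String) (out : Bool) : Prop := out = check_command_has_error_py_alt exit_code output
instance (exit_code : Int) (output : String) (out : Bool) : Decidable (Spec_check_command_has_error_py exit_code output out) := by unfold Spec_check_command_has_error_py; infer_instance

-- ===== CLAIM (what is proved, stated in full; the proofs are below) =====
def Claim_equal_check_command_has_error_py : Prop := ∀ (exit_code : Int) (output : String), Dom_check_command_has_error_py exit_code output → Spec_check_command_has_error_py exit_code output (check_command_has_error_py exit_code output)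

-- ===== LEMMAS AND PROOFS =====

-- the index lookup is exactly "patterns whose first character is c"
theorem pvByFirst_getD (c : Char) :
    pvByFirst.getD c [] = pvErrorPatterns.filter (fun p => pvHead p == c) := by
  have h : pvByFirst =
      (pvErrorPatterns.map (fun p => (pvHead p, p))).foldl
        (fun d q => d.modify q.1 [] (· ++ [q.2])) PySem.Dict.empty := by
    simp [pvByFirst, List.foldl_map]
  rw [h, PySem.Dict.getD_foldl_modify_append]
  simp [List.filter_map, Function.comp_def]

-- every pattern is nonempty
theorem pvPatterns_ne : ∀ p ∈ pvErrorPatterns, p.toList ≠ [] := by decide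

-- at a position, consulting the index finds exactly what trying all patterns finds
theorem pvStep (c : Char) (rest : List Char) :
    ((pvByFirst.getD c []).any (fun p => PySem.Chars.startswith (c :: rest) p.toList))
      = pvErrorPatterns.any (fun p => PySem.Chars.startswith (c :: rest) p.toList) := by
  rw [pvByFirst_getD, List.any_filter]
  apply PySem.List.any_congr_mem
  intro p hp
  obtain ⟨h0, t, ht⟩ : ∃ h0 t, p.toList = h0 :: t := by
    cases hpl : p.toList with
    | nil => exact absurd hpl (pvPatterns_ne p hp)
    | cons h0 t => exact ⟨h0, t, rfl⟩
  have hhd : pvHead p = h0 := by simp [pvHead, ht]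
  cases hs : PySem.Chars.startswith (c :: rest) p.toList with
  | false => simp
  | true =>
      have := (PySem.Chars.startswith_iff (c :: rest) p.toList).mp hs
      rw [ht, List.cons_prefix_cons] at this
      simp [hhd, this.1]

-- the single pass finds a pattern iff some pattern occurs as a substring
theorem pvScan_eq (cs : List Char) :
    pvScan cs = pvErrorPatterns.any (fun p => PySem.Chars.isIn p.toList cs) := by
  induction cs with
  | nil => simp [pvScan]; decide
  | cons c rest ih =>
      rw [pvScan, pvStep, ih, Bool.eq_iff_iff]
      simp only [Bool.or_eq_true, List.any_eq_true, PySem.Chars.isIn_iff_infix,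
        PySem.Chars.startswith_iff, List.infix_cons_iff]
      constructor
      · rintro (⟨p, hp, h⟩ | ⟨p, hp, h⟩)
        · exact ⟨p, hp, Or.inl h⟩
        · exact ⟨p, hp, Or.inr h⟩
      · rintro ⟨p, hp, h | h⟩
        · exact Or.inl ⟨p, hp, h⟩
        · exact Or.inr ⟨p, hp, h⟩

-- ===== VERDICT (by name: the statement is the Claim_ definition above) =====
theorem check_command_has_error_py_spec : Claim_equal_check_command_has_error_py := by
  intro exit_code output _
  unfold Spec_check_command_has_error_py check_command_has_error_py check_command_has_error_py_alt
  by_cases h : exit_code ≠ 0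
  · simp [h]
  · simp only [h, if_false, pvScan_eq]
    apply PySem.List.any_congr_mem
    intro p _
    simp [PySem.Str.isIn_eq]
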